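-- pv_equiv track=rewrite | github.com/LyanKaleu/DOT-366-IFPI | Lista-5/Q10.py | maior_soma_repetidos
-- ===== SOURCE A (Python) =====
-- def maior_soma_repetidos(lista):
--     if type(lista) != list or len(lista) == 0:
--         return Exception
--
--     for i in lista:
--         if type(i) != int:
--             return Exception
--
--     soma_repetidos = {}
--
--     for num in lista:
--         if num in soma_repetidos:
--             soma_repetidos[num] += num
--         else:
--             soma_repetidos[num] = num
--
--     maior_soma = 0
--
--     for valor in soma_repetidos.values():
--         if valor > maior_soma:
--             maior_soma = valor
--
--     return maior_soma
-- ===== SOURCE B (Python) =====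
-- def maior_soma_repetidos(lista):
--     if type(lista) != list or len(lista) == 0:
--         return Exception
--
--     for i in lista:
--         if type(i) != int:
--             return Exception
--
--     ordenada = sorted(lista)
--     maior_soma = 0
--     while ordenada:
--         atual = ordenada[0]
--         qtd = 1
--         while qtd < len(ordenada) and ordenada[qtd] == atual:
--             qtd += 1
--         soma = atual * qtd
--         if soma > maior_soma:
--             maior_soma = soma
--         ordenada = ordenada[qtd:]
--     return maior_soma
-- ===== Notes on version B (the rewrite author's own statement) =====
-- stated objective: alternative
-- what changed: Replaces the dict-accumulation pass plus a max scan over dict values by a sort-then-single-sweep over consecutive equal runs (value * run length), with no dict at all; Pre_ excludes the empty list, on which A returns the class Exception rather than an int.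
import Mathlib
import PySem

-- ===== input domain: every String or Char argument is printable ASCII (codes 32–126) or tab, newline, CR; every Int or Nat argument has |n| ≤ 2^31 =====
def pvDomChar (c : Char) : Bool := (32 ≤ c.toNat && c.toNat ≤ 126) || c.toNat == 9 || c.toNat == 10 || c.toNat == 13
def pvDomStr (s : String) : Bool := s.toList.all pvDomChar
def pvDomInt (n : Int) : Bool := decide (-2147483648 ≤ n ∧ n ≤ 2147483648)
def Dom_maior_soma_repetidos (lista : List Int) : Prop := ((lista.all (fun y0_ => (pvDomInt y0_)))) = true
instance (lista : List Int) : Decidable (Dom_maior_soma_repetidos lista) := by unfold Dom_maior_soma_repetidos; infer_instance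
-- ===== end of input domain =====

-- B replaces A's dict accumulation + values scan by a sort-then-single-sweep over
-- consecutive equal runs (alternative decomposition, no dict); equivalence is about
-- the return value on non-empty lists (on [] Python A returns the class Exception).

-- ===== PORT A =====
def maior_soma_repetidos (lista : List Int) : Int :=
  -- 'return Exception' branch (empty list) is excluded by Pre_; element type checks
  -- are vacuous for List Int
  if lista.length = 0 then 0
  else
    let soma_repetidos :=
      lista.foldl
        (fun d num =>
          if d.contains num then d.modify num 0 (· + num) else d.insert num num)
        (PySem.Dict.empty : PySem.Dict Int Int)
    soma_repetidos.values.foldl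
      (fun maior_soma valor => if valor > maior_soma then valor else maior_soma) 0

-- ===== PORT B =====
-- inner while: length of the run of elements equal to `atual`
def pvRunLen (atual : Int) : List Int → Nat
  | [] => 0
  | y :: ys => if y = atual then pvRunLen atual ys + 1 else 0

-- outer while over the sorted list
def pvSweep (ordenada : List Int) (maior_soma : Int) : Int :=
  match ordenada with
  | [] => maior_soma
  | atual :: resto =>
      let qtd : Nat := pvRunLen atual resto + 1
      let soma : Int := atual * (qtd : Int)
      pvSweep (resto.drop (qtd - 1))
        (if soma > maior_soma then soma else maior_soma)
termination_by ordenada.length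
decreasing_by simp

def maior_soma_repetidos_alt (lista : List Int) : Int :=
  if lista.length = 0 then 0
  else pvSweep (PySem.List.sorted lista (fun x => x) false) 0

-- ===== PRECONDITION & SPEC =====
-- Pre_ excludes the empty list, on which Python A returns the class Exception, not an int.
def Pre_maior_soma_repetidos (lista : List Int) : Prop := lista ≠ []
instance (lista : List Int) : Decidable (Pre_maior_soma_repetidos lista) := by
  unfold Pre_maior_soma_repetidos; infer_instance

def pvWitness_maior_soma_repetidos : List Int := [1, 1, 2]

def Spec_maior_soma_repetidos (lista : List Int) (out : Int) : Prop := out = maior_soma_repetidos_alt lista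
instance (lista : List Int) (out : Int) : Decidable (Spec_maior_soma_repetidos lista out) := by unfold Spec_maior_soma_repetidos; infer_instance

-- ===== CLAIM (what is proved, stated in full; the proofs are below) =====
def Claim_equal_maior_soma_repetidos : Prop := ∀ (lista : List Int), Dom_maior_soma_repetidos lista → Pre_maior_soma_repetidos lista → Spec_maior_soma_repetidos lista (maior_soma_repetidos lista)

-- ===== LEMMAS AND PROOFS =====

theorem pv_maxfold_le (l : List Int) (f : Int → Int) (m c : Int)
    (hm : m ≤ c) (hf : ∀ x ∈ l, f x ≤ c) :
    l.foldl (fun a v => max a (f v)) m ≤ c := by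
  induction l generalizing m with
  | nil => simpa using hm
  | cons x t ih =>
      simp only [List.foldl_cons]
      exact ih (max m (f x)) (max_le hm (hf x (by simp)))
        (fun y hy => hf y (by simp [hy]))

theorem pv_maxfold_eq_of_mem_iff (K L : List Int) (f : Int → Int) (m : Int)
    (h : ∀ v, v ∈ K ↔ v ∈ L) :
    K.foldl (fun a v => max a (f v)) m = L.foldl (fun a v => max a (f v)) m := by
  apply le_antisymm
  · exact pv_maxfold_le K f m _ (PySem.List.le_foldl_max_int L f m).1
      (fun x hx => (PySem.List.le_foldl_max_int L f m).2 x ((h x).1 hx))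
  · exact pv_maxfold_le L f m _ (PySem.List.le_foldl_max_int K f m).1
      (fun x hx => (PySem.List.le_foldl_max_int K f m).2 x ((h x).2 hx))

-- value accumulated by A's dict loop
theorem pvA_getD (l : List Int) (d : PySem.Dict Int Int) (v : Int) :
    (l.foldl
      (fun d num =>
        if d.contains num then d.modify num 0 (· + num) else d.insert num num)
      d).getD v 0 = d.getD v 0 + v * l.count v := by
  induction l generalizing d with
  | nil => simp
  | cons x t ih =>
      simp only [List.foldl_cons, ih, List.count_cons]
      have hstep :
          (if d.contains x then d.modify x 0 (· + x) else d.insert x x).getD v 0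
            = if v = x then d.getD v 0 + x else d.getD v 0 := by
        by_cases hv : v = x
        · subst hv
          by_cases hc : d.contains v
          · simp [hc]
          · have h0 : d.getD v 0 = 0 :=
              PySem.Dict.getD_of_not_contains d 0 (by simpa using hc)
            simp [hc, h0]
        · by_cases hc : d.contains x
          · simp [hc, PySem.Dict.getD_modify, hv]
          · simp [hc, PySem.Dict.getD_insert, hv]
      rw [hstep]
      by_cases hv : v = x
      · subst hv; simp; ring
      · have hxv : ¬ x = v := fun h => hv h.symm
        simp [hv, hxv]

theorem pvA_mem_keys (l : List Int) (d : PySem.Dict Int Int) (v : Int) :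
    v ∈ (l.foldl
      (fun d num =>
        if d.contains num then d.modify num 0 (· + num) else d.insert num num)
      d).keys ↔ v ∈ d.keys ∨ v ∈ l := by
  induction l generalizing d with
  | nil => simp
  | cons x t ih =>
      simp only [List.foldl_cons, ih, List.mem_cons]
      by_cases hc : d.contains x
      · have hx : x ∈ d.keys := (PySem.Dict.contains_iff_mem_keys d x).1 hc
        rw [if_pos hc, PySem.Dict.keys_modify, PySem.Dict.mem_keys_insert]
        tauto
      · rw [if_neg hc, PySem.Dict.mem_keys_insert]
        tauto

theorem pvA_nodup_keys (l : List Int) (d : PySem.Dict Int Int) (hd : d.keys.Nodup) :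
    (l.foldl
      (fun d num =>
        if d.contains num then d.modify num 0 (· + num) else d.insert num num)
      d).keys.Nodup := by
  induction l generalizing d with
  | nil => simpa
  | cons x t ih =>
      simp only [List.foldl_cons]
      apply ih
      by_cases hc : d.contains x
      · simpa [hc, PySem.Dict.keys_modify] using
          PySem.Dict.nodup_keys_insert d x (d.getD x 0 + x) hd
      · simpa [hc] using PySem.Dict.nodup_keys_insert d x x hd

theorem pvRunLen_take (x : Int) (l : List Int) :
    l.take (pvRunLen x l) = List.replicate (pvRunLen x l) x := by
  induction l with
  | nil => simp [pvRunLen]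
  | cons y t ih =>
      by_cases hy : y = x
      · subst hy; simp [pvRunLen, List.replicate_succ, ih]
      · simp [pvRunLen, hy]

theorem pvRunLen_drop_ne (x : Int) (l : List Int) (v : Int)
    (hl : l.Pairwise (· ≤ ·)) (hge : ∀ y ∈ l, x ≤ y)
    (hv : v ∈ l.drop (pvRunLen x l)) : v ≠ x := by
  induction l with
  | nil => simp [pvRunLen] at hv
  | cons y t ih =>
      by_cases hy : y = x
      · subst hy
        simp only [pvRunLen] at hv
        exact ih hl.of_cons (fun z hz => (List.pairwise_cons.1 hl).1 z hz) hv
      · have hxy : x < y := lt_of_le_of_ne (hge y (by simp)) (Ne.symm hy)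
        simp only [pvRunLen, if_neg hy, List.drop_zero] at hv
        rcases List.mem_cons.1 hv with rfl | hvt
        · omega
        · have hyv : y ≤ v := (List.pairwise_cons.1 hl).1 v hvt
          omega

theorem pv_foldl_max_replicate (n : Nat) (x : Int) (f : Int → Int) (m : Int) (hn : 0 < n) :
    (List.replicate n x).foldl (fun a v => max a (f v)) m = max m (f x) := by
  induction n generalizing m with
  | zero => omega
  | succ k ih =>
      cases k with
      | zero => simp
      | succ j =>
          rw [List.replicate_succ, List.foldl_cons, ih (max m (f x)) (by omega),
            max_assoc, max_self]

theorem pvSweep_eq (n : Nat) : ∀ (s : List Int), s.length = n → s.Pairwise (· ≤ ·) →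
    ∀ m : Int, pvSweep s m = s.foldl (fun a v => max a (v * s.count v)) m := by
  induction n using Nat.strong_induction_on with
  | _ n ih =>
    intro s hn hs m
    match s with
    | [] => simp [pvSweep]
    | x :: resto =>
      rw [pvSweep]
      set q := pvRunLen x resto with hq
      have hsplit : resto = List.replicate q x ++ resto.drop q := by
        conv_lhs => rw [← List.take_append_drop q resto]
        rw [pvRunLen_take]
      set rest := resto.drop q with hrest
      have hne : ∀ v ∈ rest, v ≠ x := fun v hv =>
        pvRunLen_drop_ne x resto v hs.of_cons
          (fun z hz => (List.pairwise_cons.1 hs).1 z hz) hv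
      have hxnotin : x ∉ rest := fun h => (hne x h) rfl
      have hcx : (x :: resto).count x = (q + 1 : Nat) := by
        rw [List.count_cons_self]
        conv_lhs => rw [hsplit]
        rw [List.count_append, List.count_replicate_self,
          List.count_eq_zero_of_not_mem hxnotin]
      have hcv : ∀ v ∈ rest, (x :: resto).count v = rest.count v := by
        intro v hv
        have h1 : v ≠ x := hne v hv
        conv_lhs => rw [hsplit]
        simp [List.count_append, List.count_replicate, Ne.symm h1]
      have hlen : rest.length < n := by
        have h1 : rest.length = resto.length - q := by simp [hrest]
        have h2 : resto.length + 1 = n := by simpa using hn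
        omega
      have hrs : rest.Pairwise (· ≤ ·) :=
        (List.Pairwise.sublist (List.drop_sublist q resto) hs.of_cons)
      have hdrop : resto.drop (q + 1 - 1) = rest := by simp [hrest]
      rw [hdrop, ih rest.length hlen rest rfl hrs]
      -- right-hand side
      have hshape : x :: resto = List.replicate (q + 1) x ++ rest := by
        rw [List.replicate_succ, List.cons_append, ← hsplit]
      conv_rhs => rw [show ((x :: resto).foldl (fun a v => max a (v * (x :: resto).count v)) m)
        = ((List.replicate (q+1) x ++ rest).foldl
            (fun a v => max a (v * (x :: resto).count v)) m) from by rw [← hshape]]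
      rw [List.foldl_append,
        pv_foldl_max_replicate (q+1) x (fun v => v * (x :: resto).count v) m (by omega)]
      rw [hcx]
      have hmax : (if x * ((q:Int)+1) > m then x * ((q:Int)+1) else m)
          = max m (x * ((q+1 : Nat) : Int)) := by
        push_cast; rw [max_def]; split_ifs <;> omega
      rw [show ((pvRunLen x resto : Nat) : Int) + 1 = ((q+1 : Nat) : Int) by push_cast [hq]; ring] at *
      rw [hmax]
      exact PySem.List.foldl_congr_mem _ _ _ _
        (fun acc v hv => by rw [hcv v hv])

-- ===== VERDICT (by name: the statement is the Claim_ definition above) =====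
theorem maior_soma_repetidos_spec : Claim_equal_maior_soma_repetidos := by
  intro lista hdom hpre
  unfold Spec_maior_soma_repetidos maior_soma_repetidos maior_soma_repetidos_alt
  by_cases h0 : lista.length = 0
  · simp [h0]
  · simp only [h0, if_false]
    set s := PySem.List.sorted lista (fun x => x) false with hsdef
    have hperm : s.Perm lista := PySem.List.sorted_perm _ _ _
    have hsort : s.Pairwise (· ≤ ·) := by
      simpa using PySem.List.sorted_pairwise lista (fun x => x)
    -- A side
    set d := lista.foldl
      (fun d num =>
        if d.contains num then d.modify num 0 (· + num) else d.insert num num)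
      (PySem.Dict.empty : PySem.Dict Int Int) with hd
    have hnd : d.keys.Nodup := pvA_nodup_keys lista _ (by simp)
    have hvals : d.values = d.keys.map (fun k => d.getD k 0) :=
      PySem.Dict.values_eq_map_keys d hnd 0
    have hgetD : ∀ v, d.getD v 0 = v * lista.count v := by
      intro v; rw [hd, pvA_getD]; simp
    have hAkeys : ∀ v, v ∈ d.keys ↔ v ∈ lista := by
      intro v; rw [hd, pvA_mem_keys]; simp
    have hA : (d.values.foldl (fun maior valor => if valor > maior then valor else maior) 0)
        = d.keys.foldl (fun a v => max a (v * lista.count v)) 0 := by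
      rw [hvals, List.foldl_map]
      apply PySem.List.foldl_congr_mem
      intro acc v _
      rw [hgetD v, max_def]; split_ifs <;> omega
    rw [hA]
    -- B side
    rw [pvSweep_eq s.length s rfl hsort 0]
    have hcount : ∀ v, s.count v = lista.count v := fun v => hperm.count_eq v
    simp only [hcount]
    exact pv_maxfold_eq_of_mem_iff d.keys s _ 0
      (fun v => by rw [hAkeys v, ← hperm.mem_iff])
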